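-- pv_equiv track=rewrite | github.com/pashkov-ai/Prep | LeetCode/weekly/bc177_q1.py | minDistinctFreqPair
-- ===== SOURCE A (Python) =====
-- from collections import defaultdict
--
-- def minDistinctFreqPair(nums: list[int]) -> list[int]:
--     # O(N^2) - time, O(N) - space
--     freqs = defaultdict(int)
--     for e in nums:
--         freqs[e] += 1
--     sunums = sorted(freqs.keys())
--     for i in range(len(sunums)):
--         for j in range(i+1, len(sunums)):
--             if freqs[sunums[i]] != freqs[sunums[j]]:
--                 return [sunums[i], sunums[j]]
--     return [-1, -1]
-- ===== SOURCE B (Python) =====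
-- from collections import Counter
--
-- def minDistinctFreqPair(nums: list[int]) -> list[int]:
--     # One pass after sorting the distinct values: the lexicographically-first
--     # pair with differing frequencies must start at the smallest value, paired
--     # with the first later value whose frequency differs (if none differs from
--     # it, all frequencies are equal and no pair exists).
--     c = Counter(nums)
--     keys = sorted(c)
--     if not keys:
--         return [-1, -1]
--     k0 = keys[0]
--     f0 = c[k0]
--     for v in keys[1:]:
--         if c[v] != f0:
--             return [k0, v]
--     return [-1, -1]
-- ===== Notes on version B (the rewrite author's own statement) =====
-- stated objective: faster
-- what changed: Replaces the O(K^2) nested scan over all index pairs of the sorted distinct values with a single scan that pairs the smallest value with the first later value of differing frequency (if none differs from it, all frequencies are equal).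
import Mathlib
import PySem

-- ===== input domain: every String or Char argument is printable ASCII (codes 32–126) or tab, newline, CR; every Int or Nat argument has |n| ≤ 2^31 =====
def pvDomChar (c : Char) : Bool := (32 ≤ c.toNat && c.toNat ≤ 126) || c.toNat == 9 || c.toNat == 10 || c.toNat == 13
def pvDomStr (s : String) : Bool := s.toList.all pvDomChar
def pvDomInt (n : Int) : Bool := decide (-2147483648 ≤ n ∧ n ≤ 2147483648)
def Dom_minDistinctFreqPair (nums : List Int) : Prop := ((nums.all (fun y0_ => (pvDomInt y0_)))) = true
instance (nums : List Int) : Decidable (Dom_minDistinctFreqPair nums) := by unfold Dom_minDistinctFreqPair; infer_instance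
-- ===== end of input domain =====

-- B replaces A's O(K^2) nested pair scan with a single scan pairing the smallest
-- distinct value with the first later value of differing frequency (objective: faster).

-- ===== PORT A =====
-- inner loop: for j in range(i+1, len(sunums)) with early return
def pvAInner (freqs : PySem.Dict Int Int) (x : Int) : List Int → Option (List Int)
  | [] => none
  | y :: ys =>
    if freqs.getD x 0 ≠ freqs.getD y 0 then some [x, y] else pvAInner freqs x ys

-- outer loop: for i in range(len(sunums)); element i paired with all later elements
def pvAOuter (freqs : PySem.Dict Int Int) : List Int → Option (List Int)
  | [] => none
  | x :: xs =>
    match pvAInner freqs x xs with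
    | some r => some r
    | none => pvAOuter freqs xs

def minDistinctFreqPair (nums : List Int) : List Int :=
  let freqs : PySem.Dict Int Int :=
    nums.foldl (fun d e => d.modify e 0 (· + 1)) PySem.Dict.empty
  let sunums := PySem.List.sorted freqs.keys (fun x => x) false
  match pvAOuter freqs sunums with
  | some r => r
  | none => [-1, -1]

-- ===== PORT B =====
-- the single scan: first later value whose frequency differs from f0
def pvBScan (c : PySem.Dict Int Int) (k0 f0 : Int) : List Int → List Int
  | [] => [-1, -1]
  | v :: vs => if c.getD v 0 ≠ f0 then [k0, v] else pvBScan c k0 f0 vs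

def minDistinctFreqPair_alt (nums : List Int) : List Int :=
  let c := PySem.Dict.counter nums
  let keys := PySem.List.sorted c.keys (fun x => x) false
  match keys with
  | [] => [-1, -1]
  | k0 :: rest => pvBScan c k0 (c.getD k0 0) rest

-- ===== PRECONDITION & SPEC =====
def Spec_minDistinctFreqPair (nums : List Int) (out : List Int) : Prop := out = minDistinctFreqPair_alt nums
instance (nums : List Int) (out : List Int) : Decidable (Spec_minDistinctFreqPair nums out) := by unfold Spec_minDistinctFreqPair; infer_instance

-- ===== CLAIM (what is proved, stated in full; the proofs are below) =====
def Claim_equal_minDistinctFreqPair : Prop := ∀ (nums : List Int), Dom_minDistinctFreqPair nums → Spec_minDistinctFreqPair nums (minDistinctFreqPair nums)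

-- ===== LEMMAS AND PROOFS =====

-- ===== VERDICT (by name: the statement is the Claim_ definition above) =====
-- if the inner scan from x finds nothing, every later frequency equals x's
theorem pvAInner_none {c : PySem.Dict Int Int} {x : Int} {l : List Int}
    (h : pvAInner c x l = none) : ∀ y ∈ l, c.getD y 0 = c.getD x 0 := by
  induction l with
  | nil => intro y hy; cases hy
  | cons v vs ih =>
    intro y hy
    simp only [pvAInner] at h
    split_ifs at h with hne
    · cases hy with
      | head => omega
      | tail _ hy' => exact ih h y hy'

theorem pvAInner_of_allEq {c : PySem.Dict Int Int} {x : Int} {l : List Int}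
    (h : ∀ y ∈ l, c.getD y 0 = c.getD x 0) : pvAInner c x l = none := by
  induction l with
  | nil => rfl
  | cons v vs ih =>
    simp only [pvAInner]
    rw [if_neg (by simpa using (h v (by simp)).symm)]
    exact ih (fun y hy => h y (by simp [hy]))

-- if all elements share one frequency, the whole nested scan finds nothing
theorem pvAOuter_of_allEq {c : PySem.Dict Int Int} {v : Int} {l : List Int}
    (h : ∀ y ∈ l, c.getD y 0 = v) : pvAOuter c l = none := by
  induction l with
  | nil => rfl
  | cons x xs ih =>
    simp only [pvAOuter]
    rw [pvAInner_of_allEq (by intro y hy; rw [h y (by simp [hy]), h x (by simp)])]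
    exact ih (fun y hy => h y (by simp [hy]))

-- B's scan agrees with A's inner scan from the head
theorem pvBScan_eq_some {c : PySem.Dict Int Int} {k0 : Int} {l : List Int} {r : List Int}
    (h : pvAInner c k0 l = some r) : pvBScan c k0 (c.getD k0 0) l = r := by
  induction l with
  | nil => cases h
  | cons v vs ih =>
    simp only [pvAInner] at h
    simp only [pvBScan]
    split_ifs at h ⊢ with hne
    · cases h; rfl
    · omega
    · omega
    · exact ih h

theorem pvBScan_eq_none {c : PySem.Dict Int Int} {k0 : Int} {l : List Int}
    (h : pvAInner c k0 l = none) : pvBScan c k0 (c.getD k0 0) l = [-1, -1] := by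
  induction l with
  | nil => rfl
  | cons v vs ih =>
    simp only [pvAInner] at h
    simp only [pvBScan]
    split_ifs at h ⊢ with hne
    · omega
    · exact ih h

theorem pvMain (c : PySem.Dict Int Int) (l : List Int) :
    (match pvAOuter c l with | some r => r | none => [-1, -1]) =
    (match l with | [] => [-1, -1] | k0 :: rest => pvBScan c k0 (c.getD k0 0) rest) := by
  cases l with
  | nil => rfl
  | cons k0 rest =>
    simp only [pvAOuter]
    cases h : pvAInner c k0 rest with
    | some r => simp [pvBScan_eq_some h]
    | none =>
      rw [pvAOuter_of_allEq (v := c.getD k0 0) (pvAInner_none h), pvBScan_eq_none h]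

-- ===== VERDICT =====
theorem minDistinctFreqPair_spec : Claim_equal_minDistinctFreqPair := by
  intro nums _
  show minDistinctFreqPair nums = minDistinctFreqPair_alt nums
  simp only [minDistinctFreqPair, minDistinctFreqPair_alt,
    ← PySem.Dict.counter_eq_foldl]
  exact pvMain _ _
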